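-- pv_equiv track=rewrite | github.com/pradhanstudios/Snake | snake_game.py | board_update
-- ===== SOURCE A (Python) =====
-- def board_update(body):
--     body_segment_count = 0
--     new_board = []
--     for r in range(DIM_TILES):
--         new_row = []
--         for c in range(DIM_TILES):
--             if (r, c) in body:
--                 new_row.append(1)
--                 body_segment_count += 1
--             else:
--                 new_row.append(0)
--         new_board.append(new_row)
--     return new_board, (body_segment_count >= len(body))
--
-- DIM_TILES = 10
-- ===== SOURCE B (Python) =====
-- DIM_TILES = 10
--
--
-- def board_update(body):
--     # Paint the snake cells in one pass instead of scanning body for every cell.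
--     new_board = [[0] * DIM_TILES for _ in range(DIM_TILES)]
--     unique = 0
--     for r, c in body:
--         if 0 <= r < DIM_TILES and 0 <= c < DIM_TILES and new_board[r][c] == 0:
--             new_board[r][c] = 1
--             unique += 1
--     return new_board, unique >= len(body)
-- ===== Notes on version B (the rewrite author's own statement) =====
-- stated objective: faster
-- what changed: Instead of scanning the whole body list for each of the 100 grid cells, B builds a zero board once and makes a single pass over the body, painting each in-grid cell and counting only cells that were still unpainted (so duplicates are not recounted).
import Mathlib
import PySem

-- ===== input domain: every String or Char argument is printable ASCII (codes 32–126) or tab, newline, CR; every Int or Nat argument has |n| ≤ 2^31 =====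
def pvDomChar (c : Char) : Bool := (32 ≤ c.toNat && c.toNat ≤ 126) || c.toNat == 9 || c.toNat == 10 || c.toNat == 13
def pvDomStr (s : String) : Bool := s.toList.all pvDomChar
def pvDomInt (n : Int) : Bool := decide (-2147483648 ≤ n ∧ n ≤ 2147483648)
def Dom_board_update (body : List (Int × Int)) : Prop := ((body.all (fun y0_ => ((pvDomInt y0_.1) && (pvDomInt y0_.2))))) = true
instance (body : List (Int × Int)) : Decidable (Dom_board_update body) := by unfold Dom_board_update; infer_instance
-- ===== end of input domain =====

-- B replaces A's per-cell membership scan of `body` (one scan per grid cell) by a single pass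
-- over `body` that paints each in-grid cell and counts only newly painted (distinct) cells.

-- ===== PORT A =====
def board_update (body : List (Int × Int)) : List (List Int) × Bool :=
  let res := (PySem.List.pyRange 0 10 1).foldl
    (fun (st : List (List Int) × Int) r =>
      let inner := (PySem.List.pyRange 0 10 1).foldl
        (fun (st2 : List Int × Int) c =>
          if (r, c) ∈ body then (st2.1 ++ [1], st2.2 + 1) else (st2.1 ++ [0], st2.2))
        ([], st.2)
      (st.1 ++ [inner.1], inner.2))
    ([], (0 : Int))
  (res.1, decide (res.2 ≥ (body.length : Int)))

-- ===== PORT B =====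
-- After the guard 0 ≤ r < 10 ∧ 0 ≤ c < 10 the Python indexings board[r][c] are in range,
-- so getD/set at r.toNat, c.toNat are exact.
def board_update_alt (body : List (Int × Int)) : List (List Int) × Bool :=
  let init : List (List Int) := List.replicate 10 (List.replicate 10 0)
  let res := body.foldl
    (fun (st : List (List Int) × Int) p =>
      if 0 ≤ p.1 ∧ p.1 < 10 ∧ 0 ≤ p.2 ∧ p.2 < 10 ∧
          ((st.1.getD p.1.toNat []).getD p.2.toNat 0 = 0) then
        (st.1.set p.1.toNat ((st.1.getD p.1.toNat []).set p.2.toNat 1), st.2 + 1)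
      else st)
    (init, (0 : Int))
  (res.1, decide (res.2 ≥ (body.length : Int)))

-- ===== PRECONDITION & SPEC =====
def Spec_board_update (body : List (Int × Int)) (out : List (List Int) × Bool) : Prop := out = board_update_alt body
instance (body : List (Int × Int)) (out : List (List Int) × Bool) : Decidable (Spec_board_update body out) := by unfold Spec_board_update; infer_instance

-- ===== CLAIM (what is proved, stated in full; the proofs are below) =====
def Claim_equal_board_update : Prop := ∀ (body : List (Int × Int)), Dom_board_update body → Spec_board_update body (board_update body)

-- ===== LEMMAS AND PROOFS =====

/-- Row r of the membership board: cell c is 1 iff ((r:Int),(c:Int)) ∈ l. -/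
def pvRow (l : List (Int × Int)) (r : ℕ) : List Int :=
  (List.range 10).map (fun c : ℕ => if ((r : Int), (c : Int)) ∈ l then 1 else 0)

/-- The membership board. -/
def pvGrid (l : List (Int × Int)) : List (List Int) :=
  (List.range 10).map (pvRow l)

/-- The cells of the 10×10 grid occupied by elements of l, as a finset of ℕ-coordinates. -/
def pvCells (l : List (Int × Int)) : Finset (ℕ × ℕ) :=
  (Finset.range 10 ×ˢ Finset.range 10).filter
    (fun rc : ℕ × ℕ => ((rc.1 : Int), (rc.2 : Int)) ∈ l)

theorem pvRow_congr (l₁ l₂ : List (Int × Int)) (r : ℕ)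
    (h : ∀ c : ℕ, c < 10 → (((r : Int), (c : Int)) ∈ l₁ ↔ ((r : Int), (c : Int)) ∈ l₂)) :
    pvRow l₁ r = pvRow l₂ r := by
  unfold pvRow
  refine List.map_congr_left ?_
  intro c hc
  rw [List.mem_range] at hc
  exact if_congr (h c hc) rfl rfl

theorem pvGrid_congr (l₁ l₂ : List (Int × Int))
    (h : ∀ r c : ℕ, r < 10 → c < 10 → (((r : Int), (c : Int)) ∈ l₁ ↔ ((r : Int), (c : Int)) ∈ l₂)) :
    pvGrid l₁ = pvGrid l₂ := by
  unfold pvGrid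
  refine List.map_congr_left ?_
  intro r hr
  rw [List.mem_range] at hr
  exact pvRow_congr l₁ l₂ r (fun c hc => h r c hr hc)

theorem pvCells_congr (l₁ l₂ : List (Int × Int))
    (h : ∀ r c : ℕ, r < 10 → c < 10 → (((r : Int), (c : Int)) ∈ l₁ ↔ ((r : Int), (c : Int)) ∈ l₂)) :
    pvCells l₁ = pvCells l₂ := by
  unfold pvCells
  refine Finset.filter_congr ?_
  intro rc hrc
  simp only [Finset.mem_product, Finset.mem_range] at hrc
  simpa using h rc.1 rc.2 hrc.1 hrc.2

/-- A's inner fold. -/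
theorem pvInner (body : List (Int × Int)) (r : Int) (l : List Int) (acc : List Int) (k : Int) :
    l.foldl (fun (st2 : List Int × Int) c =>
        if (r, c) ∈ body then (st2.1 ++ [1], st2.2 + 1) else (st2.1 ++ [0], st2.2)) (acc, k)
      = (acc ++ l.map (fun c => if (r, c) ∈ body then (1 : Int) else 0),
         k + ((l.countP (fun c => decide ((r, c) ∈ body)) : ℕ) : Int)) := by
  induction l generalizing acc k with
  | nil => simp
  | cons c t ih =>
    by_cases hc : (r, c) ∈ body
    · simp only [List.foldl_cons, ih, List.map_cons, List.countP_cons,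
        decide_eq_true_eq, if_pos hc]
      exact Prod.ext (by simp) (by push_cast; ring)
    · simp only [List.foldl_cons, ih, List.map_cons, List.countP_cons,
        decide_eq_true_eq, if_neg hc]
      exact Prod.ext (by simp) (by push_cast; ring)

theorem pyRange10 : PySem.List.pyRange 0 10 1 = [0,1,2,3,4,5,6,7,8,9] := by decide

theorem pvRangeCast : ((List.range 10).map (fun n : ℕ => (n : Int))) = [0,1,2,3,4,5,6,7,8,9] := by
  decide

/-- 0/1 finset sum equals list countP. -/
theorem pvSumCount (m : ℕ) (P : ℕ → Prop) [DecidablePred P] :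
    (∑ c ∈ Finset.range m, (if P c then (1 : ℕ) else 0)) = (List.range m).countP (fun c => decide (P c)) := by
  induction m with
  | zero => simp
  | succ n ih =>
    rw [Finset.sum_range_succ, List.range_succ, List.countP_append, ih]
    simp [List.countP_cons]

/-- card of the filtered product as a row-wise sum. -/
theorem pvCardProd (P : ℕ → ℕ → Prop) [∀ r c, Decidable (P r c)] :
    ((Finset.range 10 ×ˢ Finset.range 10).filter (fun rc => P rc.1 rc.2)).card
      = ∑ r ∈ Finset.range 10, (List.range 10).countP (fun c => decide (P r c)) := by
  rw [Finset.card_filter, Finset.sum_product]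
  exact Finset.sum_congr rfl (fun r _ => pvSumCount 10 (P r))

theorem pvSumRange (f : ℕ → Int) (n : ℕ) :
    ((List.range n).map f).sum = ∑ i ∈ Finset.range n, f i := by
  induction n with
  | zero => simp
  | succ m ih => rw [List.range_succ, List.map_append, List.sum_append, Finset.sum_range_succ, ih]; simp

/-- A computes the membership board and the cell count of `pvCells`. -/
theorem pvA_eq (body : List (Int × Int)) :
    board_update body = (pvGrid body, decide (((pvCells body).card : Int) ≥ (body.length : Int))) := by
  have hfun : (fun (st : List (List Int) × Int) (r : Int) =>
      let inner := (PySem.List.pyRange 0 10 1).foldl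
        (fun (st2 : List Int × Int) c =>
          if (r, c) ∈ body then (st2.1 ++ [1], st2.2 + 1) else (st2.1 ++ [0], st2.2))
        ([], st.2)
      (st.1 ++ [inner.1], inner.2))
    = (fun (st : List (List Int) × Int) (r : Int) =>
        (st.1 ++ [(PySem.List.pyRange 0 10 1).map (fun c => if (r, c) ∈ body then (1 : Int) else 0)],
         st.2 + (((PySem.List.pyRange 0 10 1).countP (fun c => decide ((r, c) ∈ body)) : ℕ) : Int))) := by
    funext st r
    simp only [pvInner, List.nil_append]
  unfold board_update
  rw [hfun,
    PySem.List.foldl_prod_mk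
      (f := fun (a : List (List Int)) (r : Int) =>
        a ++ [(PySem.List.pyRange 0 10 1).map (fun c => if (r, c) ∈ body then (1 : Int) else 0)])
      (g := fun (a : Int) (r : Int) =>
        a + (((PySem.List.pyRange 0 10 1).countP (fun c => decide ((r, c) ∈ body)) : ℕ) : Int)),
    PySem.List.foldl_append_singleton_eq_map, PySem.List.foldl_add]
  refine Prod.ext ?_ ?_
  · show ([] : List (List Int)) ++ _ = pvGrid body
    rw [List.nil_append, pyRange10, ← pvRangeCast, List.map_map]
    unfold pvGrid pvRow
    refine List.map_congr_left ?_
    intro r _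
    simp [List.map_map, Function.comp]
  · show decide ((0 : Int) + _ ≥ _) = _
    refine congrArg (fun z : Int => decide (z ≥ (body.length : Int))) ?_
    rw [zero_add, pyRange10, ← pvRangeCast, List.map_map, pvSumRange]
    unfold pvCells
    rw [pvCardProd (fun r c => ((r : Int), (c : Int)) ∈ body)]
    push_cast
    refine Finset.sum_congr rfl (fun r _ => ?_)
    simp only [List.countP_map]
    rfl

theorem pvGrid_length (l : List (Int × Int)) : (pvGrid l).length = 10 := by simp [pvGrid]

theorem pvRow_length (l : List (Int × Int)) (r : ℕ) : (pvRow l r).length = 10 := by simp [pvRow]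

theorem pvGridRow (acc : List (Int × Int)) (rN : ℕ) (h : rN < 10) :
    (pvGrid acc).getD rN [] = pvRow acc rN := by
  rw [List.getD_eq_getElem _ _ (by rw [pvGrid_length]; omega)]
  simp [pvGrid]

/-- reading a cell of the membership board. -/
theorem pvRead (acc : List (Int × Int)) (p : Int × Int)
    (h1 : 0 ≤ p.1) (h2 : p.1 < 10) (h3 : 0 ≤ p.2) (h4 : p.2 < 10) :
    ((pvGrid acc).getD p.1.toNat []).getD p.2.toNat 0 = if p ∈ acc then 1 else 0 := by
  have hr : p.1.toNat < 10 := by omega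
  have hcN : p.2.toNat < 10 := by omega
  rw [pvGridRow acc p.1.toNat hr,
    List.getD_eq_getElem _ _ (by rw [pvRow_length]; omega)]
  simp [pvRow, Int.toNat_of_nonneg h1, Int.toNat_of_nonneg h3]

/-- writing a new cell of the membership board. -/
theorem pvWrite (acc : List (Int × Int)) (p : Int × Int)
    (h1 : 0 ≤ p.1) (h2 : p.1 < 10) (h3 : 0 ≤ p.2) (h4 : p.2 < 10) :
    (pvGrid acc).set p.1.toNat (((pvGrid acc).getD p.1.toNat []).set p.2.toNat 1)
      = pvGrid (acc ++ [p]) := by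
  have hr : p.1.toNat < 10 := by omega
  have hcN : p.2.toNat < 10 := by omega
  rw [pvGridRow acc p.1.toNat hr]
  refine List.ext_getElem (by simp [pvGrid]) ?_
  intro i hi hi2
  have hi10 : i < 10 := by simpa [pvGrid] using hi2
  rw [List.getElem_set]
  simp only [pvGrid, List.getElem_map, List.getElem_range]
  by_cases hip : p.1.toNat = i
  · rw [if_pos hip]
    subst hip
    refine List.ext_getElem (by simp [pvRow_length]) ?_
    intro j hj hj2
    have hj10 : j < 10 := by simpa [pvRow_length] using hj2
    rw [List.getElem_set]
    simp only [pvRow, List.getElem_map, List.getElem_range]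
    by_cases hjc : p.2.toNat = j
    · rw [if_pos hjc]
      subst hjc
      have hmem : ((p.1.toNat : Int), (p.2.toNat : Int)) ∈ acc ++ [p] := by
        rw [Int.toNat_of_nonneg h1, Int.toNat_of_nonneg h3]
        simp
      rw [if_pos hmem]
    · rw [if_neg hjc]
      have hj' : (j : Int) ≠ p.2 := by omega
      simp [List.mem_append, Prod.ext_iff, hj']
  · rw [if_neg hip]
    have hi' : (i : Int) ≠ p.1 := by omega
    refine pvRow_congr _ _ i ?_
    intro c hc
    simp [List.mem_append, Prod.ext_iff, hi']

theorem pvCells_snoc_new (acc : List (Int × Int)) (p : Int × Int)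
    (h1 : 0 ≤ p.1) (h2 : p.1 < 10) (h3 : 0 ≤ p.2) (h4 : p.2 < 10) (hm : p ∉ acc) :
    (pvCells (acc ++ [p])).card = (pvCells acc).card + 1 := by
  have hkey : pvCells (acc ++ [p]) = insert (p.1.toNat, p.2.toNat) (pvCells acc) := by
    ext rc
    simp only [pvCells, Finset.mem_insert, Finset.mem_filter, Finset.mem_product, Finset.mem_range,
      List.mem_append, List.mem_singleton]
    constructor
    · rintro ⟨⟨ha, hb⟩, hmem | heq⟩
      · exact Or.inr ⟨⟨ha, hb⟩, hmem⟩
      · left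
        have e1 : (rc.1 : Int) = p.1 := congrArg Prod.fst heq
        have e2 : (rc.2 : Int) = p.2 := congrArg Prod.snd heq
        exact Prod.ext (by omega) (by omega)
    · rintro (heq | ⟨⟨ha, hb⟩, hmem⟩)
      · subst heq
        refine ⟨⟨by omega, by omega⟩, Or.inr ?_⟩
        rw [Int.toNat_of_nonneg h1, Int.toNat_of_nonneg h3]
      · exact ⟨⟨ha, hb⟩, Or.inl hmem⟩
  rw [hkey, Finset.card_insert_of_notMem]
  intro hmem
  simp only [pvCells, Finset.mem_filter] at hmem
  apply hm
  have := hmem.2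
  rwa [Int.toNat_of_nonneg h1, Int.toNat_of_nonneg h3] at this

/-- B's fold step maintains the invariant. -/
theorem pvStep (acc : List (Int × Int)) (p : Int × Int) :
    (if 0 ≤ p.1 ∧ p.1 < 10 ∧ 0 ≤ p.2 ∧ p.2 < 10 ∧
          (((pvGrid acc).getD p.1.toNat []).getD p.2.toNat 0 = 0) then
        ((pvGrid acc).set p.1.toNat (((pvGrid acc).getD p.1.toNat []).set p.2.toNat 1),
          (((pvCells acc).card : Int)) + 1)
      else (pvGrid acc, ((pvCells acc).card : Int)))
      = (pvGrid (acc ++ [p]), ((pvCells (acc ++ [p])).card : Int)) := by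
  by_cases hg : 0 ≤ p.1 ∧ p.1 < 10 ∧ 0 ≤ p.2 ∧ p.2 < 10
  · obtain ⟨h1, h2, h3, h4⟩ := hg
    by_cases hm : p ∈ acc
    · rw [if_neg (by rw [pvRead acc p h1 h2 h3 h4, if_pos hm]; intro h; exact absurd h.2.2.2.2 (by norm_num))]
      have hsame : ∀ r c : ℕ, r < 10 → c < 10 →
          (((r : Int), (c : Int)) ∈ acc ↔ ((r : Int), (c : Int)) ∈ acc ++ [p]) := by
        intro r c _ _
        simp only [List.mem_append, List.mem_singleton]
        constructor
        · exact Or.inl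
        · rintro (h | h)
          · exact h
          · rwa [h]
      rw [pvGrid_congr _ _ hsame, pvCells_congr _ _ hsame]
    · rw [if_pos ⟨h1, h2, h3, h4, by rw [pvRead acc p h1 h2 h3 h4, if_neg hm]⟩]
      rw [pvWrite acc p h1 h2 h3 h4, pvCells_snoc_new acc p h1 h2 h3 h4 hm]
      push_cast
      rfl
  · rw [if_neg (fun h => hg ⟨h.1, h.2.1, h.2.2.1, h.2.2.2.1⟩)]
    have hsame : ∀ r c : ℕ, r < 10 → c < 10 →
        (((r : Int), (c : Int)) ∈ acc ↔ ((r : Int), (c : Int)) ∈ acc ++ [p]) := by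
      intro r c hr hc
      simp only [List.mem_append, List.mem_singleton]
      constructor
      · exact Or.inl
      · rintro (h | h)
        · exact h
        · exfalso
          apply hg
          have e1 : (r : Int) = p.1 := congrArg Prod.fst h
          have e2 : (c : Int) = p.2 := congrArg Prod.snd h
          refine ⟨by omega, by omega, by omega, by omega⟩
    rw [pvGrid_congr _ _ hsame, pvCells_congr _ _ hsame]

theorem pvBfold (l acc : List (Int × Int)) :
    l.foldl (fun (st : List (List Int) × Int) p =>
      if 0 ≤ p.1 ∧ p.1 < 10 ∧ 0 ≤ p.2 ∧ p.2 < 10 ∧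
          ((st.1.getD p.1.toNat []).getD p.2.toNat 0 = 0) then
        (st.1.set p.1.toNat ((st.1.getD p.1.toNat []).set p.2.toNat 1), st.2 + 1)
      else st) (pvGrid acc, ((pvCells acc).card : Int))
    = (pvGrid (acc ++ l), ((pvCells (acc ++ l)).card : Int)) := by
  induction l generalizing acc with
  | nil => simp
  | cons p t ih =>
    rw [List.foldl_cons]
    have := pvStep acc p
    simp only at this ⊢
    rw [this, ih (acc ++ [p]), List.append_assoc]
    rfl

theorem pvB_eq (body : List (Int × Int)) :
    board_update_alt body = (pvGrid body, decide (((pvCells body).card : Int) ≥ (body.length : Int))) := by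
  unfold board_update_alt
  have h0 : (List.replicate 10 (List.replicate 10 (0:Int)), (0:Int))
      = (pvGrid [], ((pvCells []).card : Int)) := by decide
  simp only [h0]
  rw [pvBfold body []]
  simp

-- ===== VERDICT (by name: the statement is the Claim_ definition above) =====
theorem board_update_spec : Claim_equal_board_update := by
  intro body _
  unfold Spec_board_update
  rw [pvA_eq, pvB_eq]
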